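-- pv_equiv track=rewrite | github.com/cxyfer/OJ | Leetcode/python3/medium/3703_Remove K-Balanced Substrings.py | removeSubstring
-- ===== SOURCE A (Python) =====
-- def removeSubstring(s: str, k: int) -> str:
--     st = []
--     for ch in s:
--         if st and st[-1][0] == ch:
--             st[-1][1] += 1
--         else:
--             st.append([ch, 1])
--         if len(st) > 1 and st[-1][0] == ')' and st[-1][1] == k and st[-2][1] >= k:
--             st.pop()
--             st[-1][1] -= k
--             if st[-1][1] == 0:
--                 st.pop()
--     return ''.join(ch * cnt for ch, cnt in st)
-- ===== SOURCE B (Python) =====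
-- def removeSubstring(s: str, k: int) -> str:
--     out = []
--     for ch in s:
--         out.append(ch)
--         if ch == ')' and k > 0 and len(out) >= 2 * k:
--             tail = out[-2 * k:]
--             c = tail[0]
--             if c != ')' and tail[:k] == [c] * k and tail[k:] == [')'] * k:
--                 del out[-2 * k:]
--     return ''.join(out)
-- ===== Notes on version B (the rewrite author's own statement) =====
-- stated objective: alternative
-- what changed: B keeps a flat character buffer and, on each ')', checks/deletes the trailing 2k-character window (k equal non-')' chars followed by k ')') via slice comparisons, instead of A's run-length-encoded stack of [char,count] pairs with counter arithmetic.
import Mathlib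
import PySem

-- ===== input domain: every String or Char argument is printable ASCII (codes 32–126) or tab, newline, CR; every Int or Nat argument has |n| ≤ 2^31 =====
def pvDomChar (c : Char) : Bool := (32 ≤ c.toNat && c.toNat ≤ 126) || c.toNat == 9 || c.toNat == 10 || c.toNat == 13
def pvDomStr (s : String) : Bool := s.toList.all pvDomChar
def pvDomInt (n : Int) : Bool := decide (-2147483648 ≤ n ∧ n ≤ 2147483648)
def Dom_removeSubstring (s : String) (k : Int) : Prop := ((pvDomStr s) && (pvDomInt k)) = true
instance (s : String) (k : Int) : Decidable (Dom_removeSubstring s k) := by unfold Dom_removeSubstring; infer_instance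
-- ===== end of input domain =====

-- B replaces A's run-length [char,count] stack by a flat character buffer with a
-- trailing-2k-window check; same return value, proved equal on all inputs.

-- ===== PORT A =====
-- A's stack st is ported head-as-top: Python st[-1] is the head of the Lean list.
def rsMerge (st : List (Char × Int)) (ch : Char) : List (Char × Int) :=
  match st with
  | (c, n) :: rest => if c = ch then (c, n + 1) :: rest else (ch, 1) :: (c, n) :: rest
  | [] => [(ch, 1)]

def rsPop (k : Int) (st : List (Char × Int)) : List (Char × Int) :=
  match st with
  | (c1, n1) :: (c2, n2) :: rest =>
      if c1 = ')' ∧ n1 = k ∧ k ≤ n2 then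
        (if n2 - k = 0 then rest else (c2, n2 - k) :: rest)
      else (c1, n1) :: (c2, n2) :: rest
  | _ => st

def rsStep (k : Int) (st : List (Char × Int)) (ch : Char) : List (Char × Int) :=
  rsPop k (rsMerge st ch)

-- ''.join(ch * cnt for ch, cnt in st): Python string repetition ch*cnt = replicate cnt.toNat ch
def rsFlat (st : List (Char × Int)) : List Char :=
  st.reverse.flatMap (fun p => List.replicate p.2.toNat p.1)

def removeSubstring (s : String) (k : Int) : String :=
  String.mk (rsFlat (s.toList.foldl (rsStep k) []))

-- ===== PORT B =====
-- out[-2*k:] under the guard k > 0 ∧ len(out) ≥ 2*k is drop (len - 2k); tail[0] is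
-- headD (tail is nonempty under the guard); both exact on the guarded domain.
def rsCheck (k : Int) (out1 : List Char) (ch : Char) : List Char :=
  if ch = ')' ∧ 0 < k ∧ 2 * k ≤ (out1.length : Int) then
    let tail := out1.drop (out1.length - (2 * k).toNat)
    let c := tail.headD ' '
    if ¬c = ')' ∧ tail.take k.toNat = List.replicate k.toNat c ∧
        tail.drop k.toNat = List.replicate k.toNat ')' then
      out1.take (out1.length - (2 * k).toNat)
    else out1
  else out1

-- out.append(ch), then the conditional deletion of the trailing 2k window
def rsAltStep (k : Int) (out : List Char) (ch : Char) : List Char :=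
  rsCheck k (out ++ [ch]) ch

def removeSubstring_alt (s : String) (k : Int) : String :=
  String.mk (s.toList.foldl (rsAltStep k) [])

-- ===== PRECONDITION & SPEC =====
def Spec_removeSubstring (s : String) (k : Int) (out : String) : Prop := out = removeSubstring_alt s k
instance (s : String) (k : Int) (out : String) : Decidable (Spec_removeSubstring s k out) := by unfold Spec_removeSubstring; infer_instance

-- ===== CLAIM (what is proved, stated in full; the proofs are below) =====
def Claim_equal_removeSubstring : Prop := ∀ (s : String) (k : Int), Dom_removeSubstring s k → Spec_removeSubstring s k (removeSubstring s k)

-- ===== LEMMAS AND PROOFS =====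

-- invariant of A's stack: positive counts, adjacent runs carry distinct characters
def rsInv (st : List (Char × Int)) : Prop :=
  (∀ p ∈ st, 1 ≤ p.2) ∧ (st.map Prod.fst).IsChain (· ≠ ·)

theorem rsFlat_cons (c : Char) (n : Int) (rest : List (Char × Int)) :
    rsFlat ((c, n) :: rest) = rsFlat rest ++ List.replicate n.toNat c := by
  simp [rsFlat]

theorem rsFlat_last (c : Char) (n : Int) (rest : List (Char × Int)) (hn : 1 ≤ n) :
    (rsFlat ((c, n) :: rest)).getLast? = some c := by
  rw [rsFlat_cons, List.getLast?_append, List.getLast?_replicate, if_neg (by omega)]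
  rfl

theorem rep_suffix_bound (A B : List Char) (a b : ℕ) (x : Char)
    (hA : A.getLast? ≠ some x)
    (h : A ++ List.replicate a x = B ++ List.replicate b x) : b ≤ a := by
  by_contra h'
  have hab : a < b := by omega
  have hb : List.replicate b x = List.replicate (b - a) x ++ List.replicate a x := by
    rw [← List.replicate_add]; congr 1; omega
  rw [hb, ← List.append_assoc] at h
  have hAB : A = B ++ List.replicate (b - a) x := List.append_cancel_right h
  apply hA
  rw [hAB, List.getLast?_append, List.getLast?_replicate, if_neg (by omega)]
  rfl

theorem rep_suffix_unique (A B : List Char) (a b : ℕ) (x : Char)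
    (hA : A.getLast? ≠ some x) (hB : B.getLast? ≠ some x)
    (h : A ++ List.replicate a x = B ++ List.replicate b x) : a = b ∧ A = B := by
  have h1 := rep_suffix_bound A B a b x hA h
  have h2 := rep_suffix_bound B A b a x hB h.symm
  have hab : a = b := le_antisymm h2 h1
  subst hab
  exact ⟨rfl, List.append_cancel_right h⟩

theorem rsMerge_spec (st : List (Char × Int)) (ch : Char) (h : rsInv st) :
    ∃ n rest, rsMerge st ch = (ch, n) :: rest ∧ 1 ≤ n ∧ rsInv ((ch, n) :: rest) ∧
      rsFlat ((ch, n) :: rest) = rsFlat st ++ [ch] := by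
  obtain ⟨hcnt, hch⟩ := h
  match st with
  | [] =>
      refine ⟨1, [], rfl, le_refl 1, ⟨?_, ?_⟩, ?_⟩
      · intro p hp; simp at hp; simp [hp]
      · simp
      · simp [rsFlat]
  | (c, n) :: rest =>
      by_cases hce : c = ch
      · subst hce
        have hn : 1 ≤ n := hcnt (c, n) (by simp)
        refine ⟨n + 1, rest, by simp [rsMerge], by omega, ⟨?_, ?_⟩, ?_⟩
        · intro p hp
          rcases List.mem_cons.1 hp with h' | h'
          · rw [h']; omega
          · exact hcnt p (List.mem_cons_of_mem _ h')
        · simpa using hch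
        · rw [rsFlat_cons, rsFlat_cons, List.append_assoc]
          congr 1
          have h1 : (n + 1).toNat = n.toNat + 1 := by omega
          rw [h1, List.replicate_succ']
      · refine ⟨1, (c, n) :: rest, by simp [rsMerge, hce], le_refl 1, ⟨?_, ?_⟩, ?_⟩
        · intro p hp
          rcases List.mem_cons.1 hp with h' | h'
          · rw [h']
          · exact hcnt p h'
        · rw [List.map_cons, List.map_cons, List.isChain_cons_cons]
          exact ⟨fun he => hce he.symm, by simpa using hch⟩
        · rw [rsFlat_cons]
          simp

-- firing case: the buffer ends in k copies of c2 (≠ ')') followed by k copies of ')'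
theorem rsCheck_fire (k : Int) (P : List Char) (c2 : Char) (hk : 0 < k) (hc2 : ¬c2 = ')') :
    rsCheck k (P ++ (List.replicate k.toNat c2 ++ List.replicate k.toNat ')')) ')' = P := by
  have hkn : 1 ≤ k.toNat := by omega
  have hlen : (P ++ (List.replicate k.toNat c2 ++ List.replicate k.toNat ')')).length
      = P.length + (k.toNat + k.toNat) := by simp; try omega
  have hidx : (P ++ (List.replicate k.toNat c2 ++ List.replicate k.toNat ')')).length
      - (2 * k).toNat = P.length := by omega
  have hdrop : (P ++ (List.replicate k.toNat c2 ++ List.replicate k.toNat ')')).drop P.length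
      = List.replicate k.toNat c2 ++ List.replicate k.toNat ')' := List.drop_left
  have hhead : (List.replicate k.toNat c2 ++ List.replicate k.toNat ')').headD ' ' = c2 := by
    obtain ⟨j, hj⟩ : ∃ j, k.toNat = j + 1 := ⟨k.toNat - 1, by omega⟩
    rw [hj, List.replicate_succ]
    rfl
  have htake : (List.replicate k.toNat c2 ++ List.replicate k.toNat ')').take k.toNat
      = List.replicate k.toNat c2 := by
    have := List.take_left (l₁ := List.replicate k.toNat c2) (l₂ := List.replicate k.toNat ')')
    simpa using this
  have hdrop2 : (List.replicate k.toNat c2 ++ List.replicate k.toNat ')').drop k.toNat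
      = List.replicate k.toNat ')' := by
    have := List.drop_left (l₁ := List.replicate k.toNat c2) (l₂ := List.replicate k.toNat ')')
    simpa using this
  simp only [rsCheck]
  split_ifs with hg hi
  · rw [hidx]
    exact List.take_left
  · exfalso
    apply hi
    rw [hidx, hdrop, hhead]
    exact ⟨hc2, htake, hdrop2⟩
  · exfalso
    apply hg
    refine ⟨by trivial, hk, ?_⟩
    rw [hlen]
    push_cast
    omega

-- non-firing case: if A's pop condition fails on the merged stack, B's window check fails too
theorem rsCheck_skip (k : Int) (ch : Char) (n1 n2 : Int) (c2 : Char) (rest : List (Char × Int))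
    (hinv : rsInv ((ch, n1) :: (c2, n2) :: rest))
    (hA : ¬(ch = ')' ∧ n1 = k ∧ k ≤ n2)) :
    rsCheck k (rsFlat ((ch, n1) :: (c2, n2) :: rest)) ch
      = rsFlat ((ch, n1) :: (c2, n2) :: rest) := by
  obtain ⟨hcnt, hch⟩ := hinv
  have hn1 : 1 ≤ n1 := hcnt (ch, n1) (by simp)
  have hn2 : 1 ≤ n2 := hcnt (c2, n2) (by simp)
  have hne : ch ≠ c2 := by
    rw [List.map_cons, List.map_cons, List.isChain_cons_cons] at hch
    exact hch.1
  set L := rsFlat ((ch, n1) :: (c2, n2) :: rest) with hLdef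
  simp only [rsCheck]
  split_ifs with hg hi
  · exfalso
    obtain ⟨hp, hk, hlen⟩ := hg
    obtain ⟨hc, htk, hdk⟩ := hi
    set d := L.length - (2 * k).toNat with hd
    set tl := L.drop d with htl
    set c := tl.headD ' ' with hcdef
    -- L splits as (take d ++ replicate k c) ++ replicate k ')'
    have hsplit : (L.take d ++ List.replicate k.toNat c) ++ List.replicate k.toNat ')' = L := by
      rw [List.append_assoc, ← htk, ← hdk, List.take_append_drop, htl, List.take_append_drop]
    -- L also splits as Q ++ replicate n1 ')'
    have hQ : L = rsFlat ((c2, n2) :: rest) ++ List.replicate n1.toNat ')' := by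
      rw [hLdef, rsFlat_cons, hp]
    have hkn : 1 ≤ k.toNat := by omega
    have hA1 : (L.take d ++ List.replicate k.toNat c).getLast? = some c := by
      rw [List.getLast?_append, List.getLast?_replicate, if_neg (by omega)]
      rfl
    have hA1' : (L.take d ++ List.replicate k.toNat c).getLast? ≠ some ')' := by
      rw [hA1]; intro he; exact hc (by injection he)
    have hc2p : c2 ≠ ')' := by
      intro he; exact hne (by rw [hp, he])
    have hQ' : (rsFlat ((c2, n2) :: rest)).getLast? ≠ some ')' := by
      rw [rsFlat_last c2 n2 rest hn2]; intro he; exact hc2p (by injection he)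
    obtain ⟨hab, hAQ⟩ := rep_suffix_unique _ _ k.toNat n1.toNat ')' hA1' hQ'
      (by rw [hsplit]; exact hQ)
    -- so n1 = k
    have hn1k : n1 = k := by omega
    -- and c = c2
    have hcc2 : c = c2 := by
      have h1 : (L.take d ++ List.replicate k.toNat c).getLast? = some c2 := by
        rw [hAQ]; exact rsFlat_last c2 n2 rest hn2
      rw [hA1] at h1
      exact Option.some.inj h1
    -- and k ≤ n2 via the maximal c2-suffix of Q
    have hrl : (rsFlat rest).getLast? ≠ some c2 := by
      match rest with
      | [] => simp [rsFlat]
      | (c3, n3) :: r =>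
          have hn3 : 1 ≤ n3 := hcnt (c3, n3) (by simp)
          rw [rsFlat_last c3 n3 r hn3]
          intro he
          rw [List.map_cons, List.map_cons, List.map_cons, List.isChain_cons_cons,
            List.isChain_cons_cons] at hch
          exact hch.2.1 (by injection he with he; rw [he])
    have hbd : k.toNat ≤ n2.toNat := by
      apply rep_suffix_bound (rsFlat rest) (L.take d) n2.toNat k.toNat c2 hrl
      rw [← rsFlat_cons, ← hAQ, hcc2]
    exact hA ⟨hp, hn1k, by omega⟩
  · rfl
  · rfl

theorem rsCheck_pop (k : Int) (ch : Char) (n1 : Int) (rest1 : List (Char × Int))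
    (hinv : rsInv ((ch, n1) :: rest1)) :
    rsCheck k (rsFlat ((ch, n1) :: rest1)) ch = rsFlat (rsPop k ((ch, n1) :: rest1)) ∧
      rsInv (rsPop k ((ch, n1) :: rest1)) := by
  obtain ⟨hcnt, hch⟩ := hinv
  have hn1 : 1 ≤ n1 := hcnt (ch, n1) (by simp)
  match rest1 with
  | [] =>
      constructor
      · show rsCheck k (rsFlat [(ch, n1)]) ch = rsFlat (rsPop k [(ch, n1)])
        have hL : rsFlat [(ch, n1)] = List.replicate n1.toNat ch := by
          rw [rsFlat_cons]; simp [rsFlat]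
        simp only [rsPop]
        simp only [rsCheck]
        split_ifs with hg hi
        · exfalso
          obtain ⟨hp, hk, hlen⟩ := hg
          obtain ⟨hc, -, -⟩ := hi
          have hlen' : (2 * k).toNat ≤ n1.toNat := by
            rw [hL] at hlen
            simp only [List.length_replicate] at hlen
            omega
          apply hc
          rw [hL]
          simp only [List.drop_replicate, List.length_replicate]
          have hm : n1.toNat - (n1.toNat - (2 * k).toNat) = (2 * k).toNat := by omega
          rw [hm]
          obtain ⟨j, hj⟩ : ∃ j, (2 * k).toNat = j + 1 := ⟨(2 * k).toNat - 1, by omega⟩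
          rw [hj, List.replicate_succ]
          simp [hp]
        · rfl
        · rfl
      · exact ⟨hcnt, hch⟩
  | (c2, n2) :: rest =>
      have hn2 : 1 ≤ n2 := hcnt (c2, n2) (by simp)
      have hne : ch ≠ c2 := by
        rw [List.map_cons, List.map_cons, List.isChain_cons_cons] at hch
        exact hch.1
      by_cases hA : ch = ')' ∧ n1 = k ∧ k ≤ n2
      · obtain ⟨hp, hk, hkn2⟩ := hA
        subst hp
        rw [hk]
        have hk0 : 0 < k := by omega
        have hc2p : ¬c2 = ')' := fun he => hne (by rw [he])
        -- decompose the buffer so the last 2k characters are visible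
        have hQ : rsFlat ((')', k) :: (c2, n2) :: rest)
            = (rsFlat rest ++ List.replicate (n2 - k).toNat c2)
              ++ (List.replicate k.toNat c2 ++ List.replicate k.toNat ')') := by
          rw [rsFlat_cons, rsFlat_cons]
          have hsplit : List.replicate n2.toNat c2
              = List.replicate (n2 - k).toNat c2 ++ List.replicate k.toNat c2 := by
            rw [← List.replicate_add]; congr 1; omega
          rw [hsplit]
          simp only [List.append_assoc]
        have hpop : rsPop k ((')', k) :: (c2, n2) :: rest)
            = if n2 - k = 0 then rest else (c2, n2 - k) :: rest := by
          simp only [rsPop]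
          rw [if_pos ⟨by trivial, by trivial, hkn2⟩]
        constructor
        · rw [hQ, rsCheck_fire k _ c2 hk0 hc2p, hpop]
          by_cases hz : n2 - k = 0
          · rw [if_pos hz]
            have h0 : (n2 - k).toNat = 0 := by omega
            rw [h0]
            simp
          · rw [if_neg hz, rsFlat_cons]
        · rw [hpop]
          have hrest_cnt : ∀ p ∈ rest, 1 ≤ p.2 := fun p hp' => hcnt p (by simp [hp'])
          have hch' := hch
          rw [List.map_cons, List.map_cons, List.isChain_cons_cons] at hch'
          by_cases hz : n2 - k = 0
          · rw [if_pos hz]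
            exact ⟨hrest_cnt, hch'.2.tail⟩
          · rw [if_neg hz]
            refine ⟨?_, ?_⟩
            · intro p hp'
              rcases List.mem_cons.1 hp' with h' | h'
              · rw [h']; simp; omega
              · exact hrest_cnt p h'
            · rw [List.map_cons]
              exact hch'.2
      · have hpop : rsPop k ((ch, n1) :: (c2, n2) :: rest) = (ch, n1) :: (c2, n2) :: rest := by
          simp only [rsPop]
          rw [if_neg hA]
        rw [hpop]
        exact ⟨rsCheck_skip k ch n1 n2 c2 rest ⟨hcnt, hch⟩ hA, hcnt, hch⟩

theorem rsStep_flat (k : Int) (st : List (Char × Int)) (ch : Char) (h : rsInv st) :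
    rsAltStep k (rsFlat st) ch = rsFlat (rsStep k st ch) ∧ rsInv (rsStep k st ch) := by
  obtain ⟨n1, rest1, hm, hn1, hinv1, hflat⟩ := rsMerge_spec st ch h
  unfold rsStep rsAltStep
  rw [hm, ← hflat]
  exact rsCheck_pop k ch n1 rest1 hinv1

theorem rsFold_flat (k : Int) (l : List Char) (st : List (Char × Int)) (h : rsInv st) :
    l.foldl (rsAltStep k) (rsFlat st) = rsFlat (l.foldl (rsStep k) st) := by
  induction l generalizing st with
  | nil => rfl
  | cons c l ih =>
      obtain ⟨h1, h2⟩ := rsStep_flat k st c h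
      simp only [List.foldl_cons, h1]
      exact ih _ h2

-- ===== VERDICT (by name: the statement is the Claim_ definition above) =====
theorem removeSubstring_spec : Claim_equal_removeSubstring := by
  intro s k _
  unfold Spec_removeSubstring removeSubstring removeSubstring_alt
  have := rsFold_flat k s.toList [] ⟨by simp, by simp⟩
  rw [← this]
  rfl
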